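-- pv_equiv track=rewrite | github.com/ram677/gfg_pod | Problem_of_the_Day/tywins_war_strategy.py | minSoldiers
-- ===== SOURCE A (Python) =====
-- import math
--
-- def minSoldiers(arr, k):
--     n = len(arr)
--     required = math.ceil(n / 2)  # troops that must be lucky
--
--     # Step 1: Count already lucky troops
--     lucky_count = sum(1 for x in arr if x % k == 0)
--     if lucky_count >= required:
--         return 0
--
--     # Step 2: Calculate soldiers needed for each non-lucky troop
--     needs = []
--     for x in arr:
--         if x % k != 0:
--             needs.append(k - (x % k))
--
--     # Step 3: Sort and pick cheapest ones
--     needs.sort()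
--     soldiers_added = sum(needs[:required - lucky_count])
--
--     return soldiers_added
-- ===== SOURCE B (Python) =====
-- def minSoldiers(arr, k):
--     # B: selection instead of sorting. The answer is the sum of the
--     # ceil(n/2) smallest values of (-x) % k (0 for already-lucky troops).
--     # Compute that sum by iterative three-way quickselect partitioning
--     # (pivot chosen by a small deterministic LCG): no sort is performed.
--     vals = [(-x) % k for x in arr]
--     m = (len(arr) + 1) // 2
--     total = 0
--     seed = 1
--     while True:
--         if m <= 0:
--             return total
--         if m >= len(vals):
--             return total + sum(vals)
--         seed = (1103515245 * seed + 12345) % 2147483648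
--         p = vals[seed % len(vals)]
--         lt = [v for v in vals if v < p]
--         gt = [v for v in vals if v > p]
--         ne = len(vals) - len(lt) - len(gt)  # multiplicity of the pivot
--         if m <= len(lt):
--             vals = lt
--         elif m <= len(lt) + ne:
--             return total + sum(lt) + p * (m - len(lt))
--         else:
--             total += sum(lt) + p * ne
--             m -= len(lt) + ne
--             vals = gt
-- ===== Notes on version B (the rewrite author's own statement) =====
-- stated objective: alternative
-- what changed: Replaces A's count/filter/sort pipeline by an iterative three-way quickselect: the sum of the ceil(n/2) smallest values of (-x) % k is accumulated by repeatedly partitioning around a middle pivot, so no sort is performed.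
-- outside the precondition, e.g. on minSoldiers([3], 0): A raises ZeroDivisionError, B raises ZeroDivisionError; on minSoldiers([2, 3], -2): A returns 0, B returns -1
import Mathlib
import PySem

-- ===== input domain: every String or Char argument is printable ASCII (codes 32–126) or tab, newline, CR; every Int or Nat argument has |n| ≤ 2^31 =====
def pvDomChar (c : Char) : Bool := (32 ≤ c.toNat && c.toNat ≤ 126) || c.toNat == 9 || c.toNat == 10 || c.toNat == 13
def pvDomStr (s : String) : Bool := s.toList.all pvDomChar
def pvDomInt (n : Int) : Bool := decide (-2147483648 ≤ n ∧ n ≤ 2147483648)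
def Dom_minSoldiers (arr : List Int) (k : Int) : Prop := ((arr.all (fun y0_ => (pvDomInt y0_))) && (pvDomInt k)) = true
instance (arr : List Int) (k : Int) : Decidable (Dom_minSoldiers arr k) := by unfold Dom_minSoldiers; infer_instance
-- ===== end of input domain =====

-- B replaces A's count/filter/sort pipeline by an iterative three-way quickselect
-- that accumulates the sum of the ceil(n/2) smallest remainders without sorting
-- (objective: alternative algorithm, similar cost).

-- ===== PORT A =====
-- math.ceil(n/2) on a nonnegative Python int n (exact here) is (n+1)/2, ported as Nat division.
def minSoldiers (arr : List Int) (k : Int) : Int :=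
  let n := arr.length
  let required : Nat := (n + 1) / 2
  let lucky_count : Nat := (arr.filter (fun x => PySem.Int.mod x k == 0)).length
  if lucky_count ≥ required then 0
  else
    let needs : List Int :=
      arr.foldl (fun acc x => if PySem.Int.mod x k != 0 then acc ++ [k - PySem.Int.mod x k] else acc) []
    let needsSorted := PySem.List.sorted needs (fun x => x) false
    (needsSorted.take (required - lucky_count)).sum

-- ===== PORT B =====
-- the 'while True' selection loop of Source B, as a recursion on the shrinking vals list;
-- the loop's locals seed, p, lt, gt, ne become the named helpers below
def nextSeed (s : Nat) : Nat := (1103515245 * s + 12345) % 2147483648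
def pivotAt (vals : List Int) (s : Nat) : Int := vals.getD (s % vals.length) 0
def ltPart (vals : List Int) (p : Int) : List Int := vals.filter (fun v => v < p)
def gtPart (vals : List Int) (p : Int) : List Int := vals.filter (fun v => p < v)
def nePart (vals : List Int) (p : Int) : Nat :=
  vals.length - (ltPart vals p).length - (gtPart vals p).length

theorem pivotAt_mem (vals : List Int) (s : Nat) (h : vals ≠ []) : pivotAt vals s ∈ vals := by
  have hidx : s % vals.length < vals.length :=
    Nat.mod_lt _ (List.length_pos_iff.mpr h)
  rw [pivotAt, List.getD_eq_getElem _ _ hidx]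
  exact List.getElem_mem hidx

theorem ltPart_length_lt (vals : List Int) (p : Int) (h : p ∈ vals) :
    (ltPart vals p).length < vals.length :=
  List.length_filter_lt_length_iff_exists.mpr ⟨_, h, by simp⟩

theorem gtPart_length_lt (vals : List Int) (p : Int) (h : p ∈ vals) :
    (gtPart vals p).length < vals.length :=
  List.length_filter_lt_length_iff_exists.mpr ⟨_, h, by simp⟩

def sumSel (vals : List Int) (m : Nat) (total : Int) (seed : Nat) : Int :=
  if m = 0 then total
  else if vals.length ≤ m then total + vals.sum
  else if m ≤ (ltPart vals (pivotAt vals (nextSeed seed))).length then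
    sumSel (ltPart vals (pivotAt vals (nextSeed seed))) m total (nextSeed seed)
  else if m ≤ (ltPart vals (pivotAt vals (nextSeed seed))).length
      + nePart vals (pivotAt vals (nextSeed seed)) then
    total + (ltPart vals (pivotAt vals (nextSeed seed))).sum
      + pivotAt vals (nextSeed seed) * ((m : Int) - (ltPart vals (pivotAt vals (nextSeed seed))).length)
  else
    sumSel (gtPart vals (pivotAt vals (nextSeed seed)))
      (m - (ltPart vals (pivotAt vals (nextSeed seed))).length - nePart vals (pivotAt vals (nextSeed seed)))
      (total + (ltPart vals (pivotAt vals (nextSeed seed))).sum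
        + pivotAt vals (nextSeed seed) * (nePart vals (pivotAt vals (nextSeed seed))))
      (nextSeed seed)
termination_by vals.length
decreasing_by
  · exact ltPart_length_lt vals _ (pivotAt_mem vals _ (by intro hv; subst hv; simp_all))
  · exact gtPart_length_lt vals _ (pivotAt_mem vals _ (by intro hv; subst hv; simp_all))

def minSoldiers_alt (arr : List Int) (k : Int) : Int :=
  sumSel (arr.map (fun x => PySem.Int.mod (-x) k)) ((arr.length + 1) / 2) 0 1

-- ===== PRECONDITION & SPEC =====
-- Pre_ excludes k ≤ 0: on k = 0 A raises ZeroDivisionError, and k < 0 is outside the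
-- problem's natural domain (the divisibility target is a positive troop size); there
-- A's negative "soldiers added" are an artefact of Python's divisor-signed modulo.
def Pre_minSoldiers (arr : List Int) (k : Int) : Prop := 1 ≤ k
instance (arr : List Int) (k : Int) : Decidable (Pre_minSoldiers arr k) := by unfold Pre_minSoldiers; infer_instance
def pvWitness_minSoldiers : List Int × Int := ([3, 4, 7], 2)
def Spec_minSoldiers (arr : List Int) (k : Int) (out : Int) : Prop := out = minSoldiers_alt arr k
instance (arr : List Int) (k : Int) (out : Int) : Decidable (Spec_minSoldiers arr k out) := by unfold Spec_minSoldiers; infer_instance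

-- ===== CLAIM (what is proved, stated in full; the proofs are below) =====
def Claim_equal_minSoldiers : Prop := ∀ (arr : List Int) (k : Int), Dom_minSoldiers arr k → Pre_minSoldiers arr k → Spec_minSoldiers arr k (minSoldiers arr k)

-- ===== LEMMAS AND PROOFS =====

-- (-x) % k vanishes exactly on the lucky troops …
theorem rem_eq_zero_of_lucky (x k : Int) (h : PySem.Int.mod x k = 0) :
    PySem.Int.mod (-x) k = 0 := by
  rw [PySem.Int.mod_eq_zero_iff_dvd] at h ⊢
  exact (Int.dvd_neg).mpr h

-- … and equals the need k - x % k on the others (for a positive k).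
theorem rem_eq_need_of_unlucky (x k : Int) (hk : 1 ≤ k) (h : PySem.Int.mod x k ≠ 0) :
    PySem.Int.mod (-x) k = k - PySem.Int.mod x k := by
  have hk0 : (0 : Int) < k := hk
  rw [PySem.Int.mod_eq_emod_of_pos hk0] at h ⊢
  rw [PySem.Int.mod_eq_emod_of_pos hk0]
  have h1 : 0 ≤ x % k := Int.emod_nonneg x (by omega)
  have h2 : x % k < k := Int.emod_lt_of_pos x hk0
  have hneg : (-x) % k = (k - x % k) % k := by
    have h3 : -x = (k - x % k) + (-(x / k) - 1) * k := by
      have h4 := Int.mul_ediv_add_emod x k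
      ring_nf
      ring_nf at h4
      linarith
    rw [h3, Int.add_mul_emod_self_right]
  rw [hneg, Int.emod_eq_of_lt (by omega) (by omega)]

-- The sorted remainder list is the lucky zeros followed by A's sorted needs.
theorem sorted_rem_decomp (arr : List Int) (k : Int) (hk : 1 ≤ k) :
    PySem.List.sorted (arr.map (fun x => PySem.Int.mod (-x) k)) (fun x => x) false
      = List.replicate (arr.filter (fun x => PySem.Int.mod x k == 0)).length 0
        ++ PySem.List.sorted
            ((arr.filter (fun x => PySem.Int.mod x k != 0)).map (fun x => k - PySem.Int.mod x k))
            (fun x => x) false := by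
  apply PySem.List.sorted_id_eq_of_perm_of_pairwise
  · -- permutation
    have hz : (arr.filter (fun x => PySem.Int.mod x k == 0)).map (fun x => PySem.Int.mod (-x) k)
        = List.replicate (arr.filter (fun x => PySem.Int.mod x k == 0)).length 0 := by
      apply List.eq_replicate_iff.mpr
      constructor
      · simp
      · intro b hb
        rcases List.mem_map.mp hb with ⟨x, hx, rfl⟩
        have := List.of_mem_filter hx
        exact rem_eq_zero_of_lucky x k (by simpa using this)
    have hn : (arr.filter (fun x => PySem.Int.mod x k != 0)).map (fun x => PySem.Int.mod (-x) k)
        = (arr.filter (fun x => PySem.Int.mod x k != 0)).map (fun x => k - PySem.Int.mod x k) := by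
      apply List.map_congr_left
      intro x hx
      have := List.of_mem_filter hx
      exact rem_eq_need_of_unlucky x k hk (by simpa using this)
    have h2 : ((arr.filter (fun x => PySem.Int.mod x k == 0))
        ++ (arr.filter (fun x => PySem.Int.mod x k != 0))).Perm arr := by
      simpa using List.filter_append_perm (fun x => PySem.Int.mod x k == 0) arr
    refine List.Perm.trans (List.Perm.append_left _ (PySem.List.sorted_perm _ _ _)) ?_
    rw [← hz, ← hn, ← List.map_append]
    exact h2.map _
  · -- sortedness of the right-hand side
    apply List.pairwise_append.mpr
    refine ⟨List.pairwise_replicate_of_refl, ?_, ?_⟩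
    · have := PySem.List.sorted_pairwise
        ((arr.filter (fun x => PySem.Int.mod x k != 0)).map (fun x => k - PySem.Int.mod x k))
        (fun x : Int => x)
      simpa using this
    · intro a ha b hb
      have ha0 : a = 0 := (List.eq_of_mem_replicate ha)
      have hbmem : b ∈ (arr.filter (fun x => PySem.Int.mod x k != 0)).map (fun x => k - PySem.Int.mod x k) := by
        exact (PySem.List.mem_sorted _ _ _ _).mp hb
      rcases List.mem_map.mp hbmem with ⟨x, hx, rfl⟩
      have hlt : PySem.Int.mod x k < k := PySem.Int.mod_lt x (by omega)
      omega

-- A equals "sum of the first m of the sorted remainder list".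
theorem minSoldiers_eq_sorted_take (arr : List Int) (k : Int) (hk : 1 ≤ k) :
    minSoldiers arr k
      = ((PySem.List.sorted (arr.map (fun x => PySem.Int.mod (-x) k)) (fun x => x) false).take
          ((arr.length + 1) / 2)).sum := by
  unfold minSoldiers
  simp only []
  rw [sorted_rem_decomp arr k hk]
  rw [PySem.List.foldl_append_if]
  set m : Nat := (arr.length + 1) / 2 with hm
  set L : Nat := (arr.filter (fun x => PySem.Int.mod x k == 0)).length with hL
  rw [List.take_append]
  rw [List.take_replicate, List.length_replicate]
  by_cases h : L ≥ m
  · rw [if_pos h]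
    have : m - L = 0 := by omega
    simp [this]
  · rw [if_neg h]
    simp

-- The three-way split around any pivot names the sorted order of vals.
theorem sorted_split (vals : List Int) (p : Int) :
    PySem.List.sorted vals (fun x => x) false
      = PySem.List.sorted (vals.filter (fun v => v < p)) (fun x => x) false
        ++ (List.replicate (vals.filter (fun v => v == p)).length p
        ++ PySem.List.sorted (vals.filter (fun v => p < v)) (fun x => x) false) := by
  apply PySem.List.sorted_id_eq_of_perm_of_pairwise
  · have heq : vals.filter (fun v => v == p) = List.replicate (vals.filter (fun v => v == p)).length p := by
      apply List.eq_replicate_iff.mpr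
      refine ⟨rfl, fun b hb => ?_⟩
      have := List.of_mem_filter hb
      simpa [beq_iff_eq] using this
    have h1 := List.filter_append_perm (fun v => decide (v < p)) vals
    have h2 := List.filter_append_perm (fun v => v == p) (vals.filter (fun x => !decide (x < p)))
    have h3 : (vals.filter (fun x => !decide (x < p))).filter (fun v => v == p)
        = vals.filter (fun v => v == p) := by
      rw [List.filter_filter]
      apply List.filter_congr
      intro x _
      by_cases hx : x = p
      · simp [beq_iff_eq, hx]
      · simp [beq_iff_eq, hx]
    have h4 : (vals.filter (fun x => !decide (x < p))).filter (fun x => !(x == p))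
        = vals.filter (fun v => p < v) := by
      rw [List.filter_filter]
      apply List.filter_congr
      intro x _
      by_cases hx : x = p
      · simp [hx]
      · by_cases hlt : x < p
        · simp [hlt, show ¬ p < x by omega]
        · simp [hx, hlt, show p < x by omega]
    have hmid : (List.replicate (vals.filter (fun v => v == p)).length p).Perm
        (vals.filter (fun v => v == p)) := by
      rw [← heq]
    refine List.Perm.trans (List.Perm.append (PySem.List.sorted_perm _ _ _)
      (List.Perm.append hmid (PySem.List.sorted_perm _ _ _))) ?_
    refine List.Perm.trans (List.Perm.append_left _ ?_) h1
    rw [← h3, ← h4]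
    exact h2
  · apply List.pairwise_append.mpr
    refine ⟨?_, ?_, ?_⟩
    · have := PySem.List.sorted_pairwise (vals.filter (fun v => v < p)) (fun x : Int => x)
      simpa using this
    · apply List.pairwise_append.mpr
      refine ⟨List.pairwise_replicate_of_refl, ?_, ?_⟩
      · have := PySem.List.sorted_pairwise (vals.filter (fun v => p < v)) (fun x : Int => x)
        simpa using this
      · intro a ha b hb
        have ha' := List.eq_of_mem_replicate ha
        have hb' := List.of_mem_filter ((PySem.List.mem_sorted _ _ _ _).mp hb)
        simp at hb'
        omega
    · intro a ha b hb
      have ha' := List.of_mem_filter ((PySem.List.mem_sorted _ _ _ _).mp ha)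
      simp at ha'
      rcases List.mem_append.mp hb with hb | hb
      · have hb' := List.eq_of_mem_replicate hb
        omega
      · have hb' := List.of_mem_filter ((PySem.List.mem_sorted _ _ _ _).mp hb)
        simp at hb'
        omega

-- counting: |vals| = |lt| + |eq| + |gt|
theorem length_three_split (vals : List Int) (p : Int) :
    vals.length = (vals.filter (fun v => v < p)).length
      + (vals.filter (fun v => v == p)).length
      + (vals.filter (fun v => p < v)).length := by
  induction vals with
  | nil => simp
  | cons x t ih =>
    by_cases h1 : x < p
    · have h2 : ¬ (x == p) = true := by simp [beq_iff_eq]; omega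
      have h3 : ¬ p < x := by omega
      simp [List.filter_cons, h1, h2, h3, ih]
      omega
    · by_cases h2 : x = p
      · simp [List.filter_cons, h1, h2, ih]
        omega
      · have h3 : p < x := by omega
        simp [List.filter_cons, h1, beq_iff_eq, h2, h3, ih]
        omega

-- nePart counts the pivot's multiplicity
theorem nePart_eq (vals : List Int) (p : Int) :
    nePart vals p = (vals.filter (fun v => v == p)).length := by
  have := length_three_split vals p
  unfold nePart ltPart gtPart
  omega

-- sorted_split restated with the loop's named parts
theorem sorted_split' (vals : List Int) (p : Int) :
    PySem.List.sorted vals (fun x => x) false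
      = PySem.List.sorted (ltPart vals p) (fun x => x) false
        ++ (List.replicate (nePart vals p) p
        ++ PySem.List.sorted (gtPart vals p) (fun x => x) false) := by
  rw [nePart_eq]
  exact sorted_split vals p

-- The selection loop computes the sum of the m smallest elements (any seed).
theorem sumSel_eq (vals : List Int) (m : Nat) (total : Int) (seed : Nat) :
    sumSel vals m total seed
      = total + ((PySem.List.sorted vals (fun x => x) false).take m).sum := by
  induction vals, m, total, seed using sumSel.induct with
  | case1 vals total seed =>
    rw [sumSel]
    simp
  | case2 vals m total seed hm hlen =>
    rw [sumSel, if_neg hm, if_pos hlen]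
    rw [List.take_of_length_le (by rw [PySem.List.length_sorted]; exact hlen)]
    rw [(PySem.List.sorted_perm vals (fun x => x) false).sum_eq]
  | case3 vals m total seed hm hlen h1 ih =>
    rw [sumSel, if_neg hm, if_neg hlen, if_pos h1, ih]
    congr 2
    rw [sorted_split' vals (pivotAt vals (nextSeed seed))]
    rw [List.take_append_of_le_length (by rw [PySem.List.length_sorted]; exact h1)]
  | case4 vals m total seed hm hlen h1 h2 =>
    rw [sumSel, if_neg hm, if_neg hlen, if_neg h1, if_pos h2]
    rw [sorted_split' vals (pivotAt vals (nextSeed seed)), List.take_append, List.sum_append]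
    rw [List.take_of_length_le (by rw [PySem.List.length_sorted]; omega)]
    rw [(PySem.List.sorted_perm (ltPart vals (pivotAt vals (nextSeed seed))) (fun x => x) false).sum_eq]
    rw [PySem.List.length_sorted]
    rw [List.take_append, List.take_replicate, List.length_replicate, List.sum_append]
    have hmin : min (m - (ltPart vals (pivotAt vals (nextSeed seed))).length)
        (nePart vals (pivotAt vals (nextSeed seed)))
        = m - (ltPart vals (pivotAt vals (nextSeed seed))).length := by omega
    have hz : m - (ltPart vals (pivotAt vals (nextSeed seed))).length
        - nePart vals (pivotAt vals (nextSeed seed)) = 0 := by omega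
    rw [hmin, hz]
    simp [List.sum_replicate]
    push_cast [show (ltPart vals (pivotAt vals (nextSeed seed))).length ≤ m by omega]
    ring
  | case5 vals m total seed hm hlen h1 h2 ih =>
    rw [sumSel, if_neg hm, if_neg hlen, if_neg h1, if_neg h2]
    rw [sorted_split' vals (pivotAt vals (nextSeed seed)), List.take_append, List.sum_append]
    rw [List.take_of_length_le (by rw [PySem.List.length_sorted]; omega)]
    rw [(PySem.List.sorted_perm (ltPart vals (pivotAt vals (nextSeed seed))) (fun x => x) false).sum_eq]
    rw [PySem.List.length_sorted]
    rw [List.take_append, List.take_replicate, List.length_replicate, List.sum_append]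
    have hmin : min (m - (ltPart vals (pivotAt vals (nextSeed seed))).length)
        (nePart vals (pivotAt vals (nextSeed seed)))
        = nePart vals (pivotAt vals (nextSeed seed)) := by omega
    rw [hmin, ih]
    simp [List.sum_replicate]
    ring

-- ===== VERDICT (by name: the statement is the Claim_ definition above) =====
theorem minSoldiers_spec : Claim_equal_minSoldiers := by
  intro arr k _ hpre
  unfold Spec_minSoldiers minSoldiers_alt
  rw [sumSel_eq, minSoldiers_eq_sorted_take arr k hpre]
  ring
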